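-- pv_equiv track=rewrite | github.com/JiayangWu/codewars-solutions-in-python | 048-6kyu-Which are in.py | in_array
-- ===== SOURCE A (Python) =====
-- def in_array(array1, array2):
--     # your code
--     s = set(array2)
--     res = []
--     for word in array1:
--         for w in array2:
--             if word in w and word not in res:
--                 res.append(word)
--                 break
--     return sorted(res)
-- ===== SOURCE B (Python) =====
-- def in_array(array1, array2):
--     subs = set()
--     for w in array2:
--         n = len(w)
--         for i in range(n + 1):
--             for j in range(i, n + 1):
--                 subs.add(w[i:j])
--     return sorted({x for x in array1 if x in subs})
-- ===== Notes on version B (the rewrite author's own statement) =====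
-- stated objective: faster
-- what changed: B precomputes the set of all substrings of every array2 word once and replaces A's per-word scan of array2 (plus A's linear 'word not in res' dedup scan) by an O(1) set-membership lookup and a set-comprehension dedup.
import Mathlib
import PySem

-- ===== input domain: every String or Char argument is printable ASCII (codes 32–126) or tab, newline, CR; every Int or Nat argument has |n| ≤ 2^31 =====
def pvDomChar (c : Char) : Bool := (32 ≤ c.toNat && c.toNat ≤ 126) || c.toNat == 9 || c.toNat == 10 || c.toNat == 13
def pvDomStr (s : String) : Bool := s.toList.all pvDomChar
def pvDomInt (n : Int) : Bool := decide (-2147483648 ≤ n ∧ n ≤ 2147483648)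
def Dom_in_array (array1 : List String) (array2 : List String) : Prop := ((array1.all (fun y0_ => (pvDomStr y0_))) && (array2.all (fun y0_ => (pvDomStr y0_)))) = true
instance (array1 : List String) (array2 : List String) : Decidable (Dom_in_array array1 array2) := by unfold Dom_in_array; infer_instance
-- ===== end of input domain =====

-- B replaces A's nested scan of array2 per word (with a linear dedup scan of res) by a
-- precomputed set of all substrings of array2 and a set-comprehension dedup; objective: faster.

-- ===== PORT A =====
-- inner 'for w in array2: if word in w and word not in res: res.append(word); break'
def inArrayLoop (word : String) (res : List String) : List String → List String
  | [] => res
  | w :: ws =>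
    if PySem.Str.isIn word w && !res.contains word then res ++ [word]
    else inArrayLoop word res ws

def in_array (array1 : List String) (array2 : List String) : List String :=
  let _s := PySem.Set.ofList array2   -- A's unused 's = set(array2)'
  let res := array1.foldl (fun res word => inArrayLoop word res array2) []
  PySem.List.sorted res (fun x => x) false

-- ===== PORT B =====
def in_array_alt (array1 : List String) (array2 : List String) : List String :=
  let subs : PySem.Set String :=
    array2.foldl (fun subs w =>
      let n : Int := PySem.Str.len w
      (PySem.List.pyRange 0 (n + 1) 1).foldl (fun subs i =>
        (PySem.List.pyRange i (n + 1) 1).foldl (fun subs j =>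
          PySem.Set.add subs (PySem.Str.slice w (some i) (some j))) subs) subs)
      PySem.Set.empty
  PySem.List.sorted
    (PySem.Set.ofList (array1.filter (fun x => PySem.Set.contains subs x)))
    (fun x => x) false

-- ===== PRECONDITION & SPEC =====
def Spec_in_array (array1 : List String) (array2 : List String) (out : List String) : Prop := out = in_array_alt array1 array2
instance (array1 : List String) (array2 : List String) (out : List String) : Decidable (Spec_in_array array1 array2 out) := by unfold Spec_in_array; infer_instance

-- ===== CLAIM (what is proved, stated in full; the proofs are below) =====
def Claim_equal_in_array : Prop := ∀ (array1 : List String) (array2 : List String), Dom_in_array array1 array2 → Spec_in_array array1 array2 (in_array array1 array2)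

-- ===== LEMMAS AND PROOFS =====

-- generic: membership through a foldl whose step's membership is characterised pointwise
theorem mem_foldl_step {α β : Type} (f : List α → β → List α) (P : β → α → Prop)
    (hf : ∀ s b x, x ∈ f s b ↔ x ∈ s ∨ P b x) :
    ∀ (l : List β) (s : List α) (x : α), x ∈ l.foldl f s ↔ x ∈ s ∨ ∃ b ∈ l, P b x := by
  intro l
  induction l with
  | nil => intro s x; simp
  | cons b bs ih =>
    intro s x
    simp only [List.foldl_cons, ih, hf, List.mem_cons]
    constructor
    · rintro ((h | h) | ⟨b', hb', h⟩)
      · exact Or.inl h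
      · exact Or.inr ⟨b, Or.inl rfl, h⟩
      · exact Or.inr ⟨b', Or.inr hb', h⟩
    · rintro (h | ⟨b', (rfl | hb'), h⟩)
      · exact Or.inl (Or.inl h)
      · exact Or.inl (Or.inr h)
      · exact Or.inr ⟨b', hb', h⟩

-- A's inner loop, closed form
theorem inArrayLoop_eq (word : String) (res : List String) (l : List String) :
    inArrayLoop word res l =
      if l.any (fun w => PySem.Str.isIn word w) && !res.contains word then res ++ [word]
      else res := by
  induction l with
  | nil => simp [inArrayLoop]
  | cons w ws ih =>
    cases h1 : PySem.Str.isIn word w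
    · simp only [inArrayLoop, h1, ih]
      have h1' : ¬ (PySem.Chars.isIn word.toList w.toList = true) := by simpa using h1
      simp [h1']
    · by_cases h2 : word ∈ res <;> simp [inArrayLoop, h2, ih] <;> split_ifs <;> tauto

-- A's outer step is 'conditionally Set.add'
theorem stepA_eq (array2 : List String) :
    (fun res word => inArrayLoop word res array2) =
      (fun (res : List String) word =>
        if array2.any (fun w => PySem.Str.isIn word w) then PySem.Set.add res word else res) := by
  funext res word
  rw [inArrayLoop_eq]
  by_cases hp : ∃ x ∈ array2, PySem.Chars.isIn word.toList x.toList = true <;>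
    by_cases hc : word ∈ res <;>
    simp [hp, hc, PySem.Set.add, PySem.Set.contains]

-- A's result, characterised
theorem in_array_eq (array1 array2 : List String) :
    in_array array1 array2 =
      PySem.List.sorted
        (PySem.Set.ofList (array1.filter (fun word => array2.any (fun w => PySem.Str.isIn word w))))
        (fun x => x) false := by
  show PySem.List.sorted (array1.foldl (fun res word => inArrayLoop word res array2) []) (fun x => x) false = _
  rw [stepA_eq, ← List.foldl_filter, ← PySem.Set.ofList_eq_foldl]

-- membership in B's substring set
theorem mem_subs (array2 : List String) (x : String) :
    x ∈ array2.foldl (fun subs w =>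
        let n : Int := PySem.Str.len w
        (PySem.List.pyRange 0 (n + 1) 1).foldl (fun subs i =>
          (PySem.List.pyRange i (n + 1) 1).foldl (fun subs j =>
            PySem.Set.add subs (PySem.Str.slice w (some i) (some j))) subs) subs)
      PySem.Set.empty
      ↔ ∃ w ∈ array2, ∃ i ∈ PySem.List.pyRange 0 (PySem.Str.len w + 1) 1,
          ∃ j ∈ PySem.List.pyRange i (PySem.Str.len w + 1) 1,
            x = PySem.Str.slice w (some i) (some j) := by
  have hinner : ∀ (w : String) (i : Int) (s : List String) (y : String),
      y ∈ (PySem.List.pyRange i (PySem.Str.len w + 1) 1).foldl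
            (fun subs j => PySem.Set.add subs (PySem.Str.slice w (some i) (some j))) s
        ↔ y ∈ s ∨ ∃ j ∈ PySem.List.pyRange i (PySem.Str.len w + 1) 1,
            y = PySem.Str.slice w (some i) (some j) :=
    fun w i => mem_foldl_step _ (fun j y => y = PySem.Str.slice w (some i) (some j))
      (fun s j y => PySem.Set.mem_add s _ y) _
  have hmid : ∀ (w : String) (s : List String) (y : String),
      y ∈ (PySem.List.pyRange 0 (PySem.Str.len w + 1) 1).foldl
            (fun subs i => (PySem.List.pyRange i (PySem.Str.len w + 1) 1).foldl
              (fun subs j => PySem.Set.add subs (PySem.Str.slice w (some i) (some j))) subs) s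
        ↔ y ∈ s ∨ ∃ i ∈ PySem.List.pyRange 0 (PySem.Str.len w + 1) 1,
            ∃ j ∈ PySem.List.pyRange i (PySem.Str.len w + 1) 1,
              y = PySem.Str.slice w (some i) (some j) :=
    fun w => mem_foldl_step _ _ (fun s i y => hinner w i s y) _
  have houter :
      x ∈ array2.foldl (fun subs w =>
        let n : Int := PySem.Str.len w
        (PySem.List.pyRange 0 (n + 1) 1).foldl (fun subs i =>
          (PySem.List.pyRange i (n + 1) 1).foldl (fun subs j =>
            PySem.Set.add subs (PySem.Str.slice w (some i) (some j))) subs) subs)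
      PySem.Set.empty
        ↔ x ∈ (PySem.Set.empty : PySem.Set String) ∨ ∃ w ∈ array2,
            ∃ i ∈ PySem.List.pyRange 0 (PySem.Str.len w + 1) 1,
              ∃ j ∈ PySem.List.pyRange i (PySem.Str.len w + 1) 1,
                x = PySem.Str.slice w (some i) (some j) :=
    mem_foldl_step _ _ (fun s w y => hmid w s y) array2 PySem.Set.empty x
  simpa [PySem.Set.empty] using houter

-- the enumerated slices are exactly the infixes
theorem slice_range_iff_isIn (w x : String) :
    (∃ i ∈ PySem.List.pyRange 0 (PySem.Str.len w + 1) 1,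
      ∃ j ∈ PySem.List.pyRange i (PySem.Str.len w + 1) 1,
        x = PySem.Str.slice w (some i) (some j))
      ↔ PySem.Str.isIn x w = true := by
  constructor
  · rintro ⟨i, hi, j, hj, rfl⟩
    rw [PySem.List.mem_pyRange_one] at hi hj
    rw [PySem.Str.isIn_iff_infix, PySem.Str.toList_slice, PySem.Chars.slice_eq_listSlice,
      PySem.List.slice_toNat]
    · exact ((List.take_prefix _ _).isInfix).trans ((List.drop_suffix _ _).isInfix)
    · exact hi.1
    · exact le_trans hi.1 hj.1
  · intro h
    rw [PySem.Str.isIn_iff_infix] at h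
    obtain ⟨s, t, hst⟩ := h
    have hi : s.length ≤ w.toList.length := by
      rw [← hst]; simp
    have hpre : x.toList <+: w.toList.drop s.length := by
      rw [← hst, List.append_assoc, List.drop_left]
      exact ⟨t, rfl⟩
    have hx : x.toList = (w.toList.drop s.length).take x.toList.length :=
      List.prefix_iff_eq_take.mp hpre
    have hlen : x.toList.length ≤ w.toList.length - s.length := by
      have := hpre.length_le
      simpa using this
    have hlenw : PySem.Str.len w = (w.toList.length : Int) := by
      simp [PySem.Str.len_eq]
    refine ⟨(s.length : Int), ?_, ((s.length + x.toList.length : Nat) : Int), ?_, ?_⟩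
    · rw [PySem.List.mem_pyRange_one, hlenw]
      constructor
      · exact Int.natCast_nonneg _
      · omega
    · rw [PySem.List.mem_pyRange_one, hlenw]
      push_cast
      constructor <;> omega
    · apply String.toList_inj.mp
      rw [PySem.Str.toList_slice, PySem.Chars.slice_eq_listSlice, PySem.List.slice_natCast,
        Nat.add_sub_cancel_left]
      exact hx

-- the two filter predicates agree
theorem pred_eq (array2 : List String) (x : String) :
    (array2.any (fun w => PySem.Str.isIn x w)) =
      PySem.Set.contains
        (array2.foldl (fun subs w =>
        let n : Int := PySem.Str.len w
        (PySem.List.pyRange 0 (n + 1) 1).foldl (fun subs i =>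
          (PySem.List.pyRange i (n + 1) 1).foldl (fun subs j =>
            PySem.Set.add subs (PySem.Str.slice w (some i) (some j))) subs) subs)
      PySem.Set.empty) x := by
  apply Bool.eq_iff_iff.mpr
  rw [PySem.Set.contains_iff, mem_subs, List.any_eq_true]
  constructor
  · rintro ⟨w, hw, h⟩
    exact ⟨w, hw, (slice_range_iff_isIn w x).mpr h⟩
  · rintro ⟨w, hw, h⟩
    exact ⟨w, hw, (slice_range_iff_isIn w x).mp h⟩

-- ===== VERDICT (by name: the statement is the Claim_ definition above) =====
theorem in_array_spec : Claim_equal_in_array := by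
  intro array1 array2 _
  show in_array array1 array2 = in_array_alt array1 array2
  rw [in_array_eq]
  show _ = PySem.List.sorted
    (PySem.Set.ofList (array1.filter (fun x => PySem.Set.contains
      (array2.foldl (fun subs w =>
        let n : Int := PySem.Str.len w
        (PySem.List.pyRange 0 (n + 1) 1).foldl (fun subs i =>
          (PySem.List.pyRange i (n + 1) 1).foldl (fun subs j =>
            PySem.Set.add subs (PySem.Str.slice w (some i) (some j))) subs) subs)
      PySem.Set.empty) x)))
    (fun x => x) false
  refine congrArg (fun l => PySem.List.sorted l (fun x : String => x) false)
    (congrArg PySem.Set.ofList ?_)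
  exact List.filter_congr (fun x _ => pred_eq array2 x)
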